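-- pv_equiv track=rewrite | github.com/Pranav452/Day-4 | q3/reasoning/tool_router.py | _extract_tools_section
-- ===== SOURCE A (Python) =====
-- def _extract_tools_section(response: str) -> str:
--     """Extract the TOOLS_NEEDED section from LLM response."""
--     lines = response.split('\n')
--     in_tools_section = False
--     tools_content = []
--
--     for line in lines:
--         line = line.strip()
--         if line.startswith('TOOLS_NEEDED:'):
--             in_tools_section = True
--             content = line.replace('TOOLS_NEEDED:', '').strip()
--             if content:
--                 tools_content.append(content)
--         elif line.startswith('FINAL_ANSWER:'):
--             break
--         elif in_tools_section and line:
--             tools_content.append(line)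
--
--     return ' '.join(tools_content)
-- ===== SOURCE B (Python) =====
-- def _extract_tools_section(response: str) -> str:
--     """Extract the TOOLS_NEEDED section from LLM response."""
--     lines = [l.strip() for l in response.split('\n')]
--     # region of interest: everything before the first FINAL_ANSWER: line
--     cut = next((i for i, l in enumerate(lines) if l.startswith('FINAL_ANSWER:')), len(lines))
--     region = lines[:cut]
--     # the section starts at the first TOOLS_NEEDED: line inside the region
--     start = next((i for i, l in enumerate(region) if l.startswith('TOOLS_NEEDED:')), None)
--     if start is None:
--         return ''
--     parts = []
--     for l in region[start:]:
--         if l.startswith('TOOLS_NEEDED:'):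
--             content = l.replace('TOOLS_NEEDED:', '').strip()
--             if content:
--                 parts.append(content)
--         elif l:
--             parts.append(l)
--     return ' '.join(parts)
-- ===== Notes on version B (the rewrite author's own statement) =====
-- stated objective: alternative
-- what changed: Replaced A's single stateful one-pass loop (in_tools_section flag + break) by a decomposition: strip all lines, locate the FINAL_ANSWER: cutoff, find the first TOOLS_NEEDED: line in that region, then collect from a slice starting there.
import Mathlib
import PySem

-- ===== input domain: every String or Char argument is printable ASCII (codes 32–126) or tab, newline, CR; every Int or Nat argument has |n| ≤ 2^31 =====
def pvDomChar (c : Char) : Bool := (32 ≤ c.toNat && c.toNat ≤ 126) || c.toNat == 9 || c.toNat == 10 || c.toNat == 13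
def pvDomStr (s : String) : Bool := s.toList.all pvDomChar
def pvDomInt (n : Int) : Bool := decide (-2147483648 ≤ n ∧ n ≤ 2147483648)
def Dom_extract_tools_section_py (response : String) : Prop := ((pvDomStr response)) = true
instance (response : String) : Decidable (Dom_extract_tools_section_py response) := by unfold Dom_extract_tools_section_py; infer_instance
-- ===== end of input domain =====

-- B replaces A's single stateful flag-driven loop by a boundary-location step (cut at the
-- first FINAL_ANSWER: line, find the first TOOLS_NEEDED: line) plus a slice-based collection
-- pass; same return value (objective: alternative decomposition, no speed claim).

-- ===== PORT A =====
-- A's for-loop with its in_tools_section flag and break; the recursion returns the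
-- tools_content list built from the current point on (break = return []).
def pvALoop : List String → Bool → List String
  | [], _ => []
  | l :: rest, flag =>
    let s := PySem.Str.strip l
    if PySem.Str.startswith s "TOOLS_NEEDED:" then
      let content := PySem.Str.strip (PySem.Str.replace s "TOOLS_NEEDED:" "")
      if content ≠ "" then content :: pvALoop rest true else pvALoop rest true
    else if PySem.Str.startswith s "FINAL_ANSWER:" then []
    else if flag = true ∧ s ≠ "" then s :: pvALoop rest flag
    else pvALoop rest flag

def extract_tools_section_py (response : String) : String :=
  PySem.Str.join " " (pvALoop ((PySem.Str.split? response "\n").getD []) false)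

-- ===== PORT B =====
-- B's collection pass over region[start:] (lines already stripped).
def pvBCollect : List String → List String
  | [] => []
  | l :: rest =>
    if PySem.Str.startswith l "TOOLS_NEEDED:" then
      let content := PySem.Str.strip (PySem.Str.replace l "TOOLS_NEEDED:" "")
      if content ≠ "" then content :: pvBCollect rest else pvBCollect rest
    else if l ≠ "" then l :: pvBCollect rest
    else pvBCollect rest

def extract_tools_section_py_alt (response : String) : String :=
  let lines := ((PySem.Str.split? response "\n").getD []).map PySem.Str.strip
  let cut := (lines.findIdx? (fun l => PySem.Str.startswith l "FINAL_ANSWER:")).getD lines.length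
  let region := lines.take cut
  match region.findIdx? (fun l => PySem.Str.startswith l "TOOLS_NEEDED:") with
  | none => ""
  | some i => PySem.Str.join " " (pvBCollect (region.drop i))

-- ===== PRECONDITION & SPEC =====
def Spec_extract_tools_section_py (response : String) (out : String) : Prop := out = extract_tools_section_py_alt response
instance (response : String) (out : String) : Decidable (Spec_extract_tools_section_py response out) := by unfold Spec_extract_tools_section_py; infer_instance

-- ===== CLAIM (what is proved, stated in full; the proofs are below) =====
def Claim_equal_extract_tools_section_py : Prop := ∀ (response : String), Dom_extract_tools_section_py response → Spec_extract_tools_section_py response (extract_tools_section_py response)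

-- ===== LEMMAS AND PROOFS =====

-- a stripped line cannot start with both markers (they differ at the first character)
theorem pv_not_both (s : String) (h : PySem.Str.startswith s "TOOLS_NEEDED:" = true) :
    PySem.Str.startswith s "FINAL_ANSWER:" = false := by
  simp only [PySem.Str.startswith_eq] at *
  rw [PySem.Chars.startswith_iff] at h
  rw [← Bool.not_eq_true, PySem.Chars.startswith_iff]
  intro h2
  obtain ⟨t1, e1⟩ := h
  obtain ⟨t2, e2⟩ := h2
  rw [← e1] at e2
  simp at e2

-- taking up to the first index satisfying p is takeWhile (!p)
theorem pv_take_findIdx (p : String → Bool) (ls : List String) :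
    ls.take ((ls.findIdx? p).getD ls.length) = ls.takeWhile (fun x => !p x) := by
  induction ls with
  | nil => rfl
  | cons a l ih =>
    by_cases hp : p a = true
    · simp [List.findIdx?_cons, hp]
    · simp only [List.findIdx?_cons, hp, if_neg, Bool.false_eq_true, not_false_iff]
      simp only [Bool.not_eq_true] at hp
      cases hfi : l.findIdx? p with
      | none => simpa [hp, List.takeWhile_cons, hfi] using ih
      | some i => simpa [hp, List.takeWhile_cons, hfi] using ih

-- once inside the section, A's loop collects exactly B's collection pass over the
-- stripped lines truncated at the first FINAL_ANSWER: line
theorem pv_flag_true (ls : List String) :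
    pvALoop ls true =
      pvBCollect ((ls.map PySem.Str.strip).takeWhile
        (fun x => !PySem.Str.startswith x "FINAL_ANSWER:")) := by
  induction ls with
  | nil => rfl
  | cons l rest ih =>
    by_cases hT : PySem.Str.startswith (PySem.Str.strip l) "TOOLS_NEEDED:" = true
    · have hF := pv_not_both _ hT
      simp at hT hF
      simp [pvALoop, pvBCollect, hT, hF, ih]
    · by_cases hF : PySem.Str.startswith (PySem.Str.strip l) "FINAL_ANSWER:" = true
      · simp at hT hF
        simp [pvALoop, pvBCollect, hT, hF]
      · simp at hT hF
        simp [pvALoop, pvBCollect, hT, hF, ih]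

-- skipping a non-TOOLS_NEEDED: line does not change B's find-then-collect result
theorem pv_skip (s : String) (tw : List String)
    (hs : PySem.Str.startswith s "TOOLS_NEEDED:" = false) :
    (match (s :: tw).findIdx? (fun l => PySem.Str.startswith l "TOOLS_NEEDED:") with
     | none => ""
     | some i => PySem.Str.join " " (pvBCollect ((s :: tw).drop i))) =
    (match tw.findIdx? (fun l => PySem.Str.startswith l "TOOLS_NEEDED:") with
     | none => ""
     | some i => PySem.Str.join " " (pvBCollect (tw.drop i))) := by
  cases hfi : tw.findIdx? (fun l => PySem.Str.startswith l "TOOLS_NEEDED:") with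
  | none =>
      simp at hs
      have h2 : List.findIdx?
          (fun l => PySem.Chars.startswith l.toList
            ['T', 'O', 'O', 'L', 'S', '_', 'N', 'E', 'E', 'D', 'E', 'D', ':']) tw = none := by
        simpa using hfi
      simp [List.findIdx?_cons, hs, h2]
  | some i =>
      simp at hs hfi
      simp [List.findIdx?_cons, hs, hfi]

-- before the section, A's loop result matches B's find-then-collect over the region
theorem pv_flag_false (ls : List String) :
    PySem.Str.join " " (pvALoop ls false) =
      (match ((ls.map PySem.Str.strip).takeWhile
          (fun x => !PySem.Str.startswith x "FINAL_ANSWER:")).findIdx?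
          (fun l => PySem.Str.startswith l "TOOLS_NEEDED:") with
       | none => ""
       | some i => PySem.Str.join " "
           (pvBCollect (((ls.map PySem.Str.strip).takeWhile
              (fun x => !PySem.Str.startswith x "FINAL_ANSWER:")).drop i))) := by
  induction ls with
  | nil => rfl
  | cons l rest ih =>
    by_cases hT : PySem.Str.startswith (PySem.Str.strip l) "TOOLS_NEEDED:" = true
    · have hF := pv_not_both _ hT
      have hft := pv_flag_true rest
      simp at hT hF
      simp [pvALoop, pvBCollect, hT, hF, hft, List.findIdx?_cons]
    · by_cases hF : PySem.Str.startswith (PySem.Str.strip l) "FINAL_ANSWER:" = true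
      · have hT' := hT; have hF' := hF
        simp at hT' hF'
        simp [pvALoop, hT', hF', PySem.Str.join]
      · have hskip := pv_skip (PySem.Str.strip l)
          ((rest.map PySem.Str.strip).takeWhile
            (fun x => !PySem.Str.startswith x "FINAL_ANSWER:"))
          (eq_false_of_ne_true hT)
        have hA : PySem.Str.join " " (pvALoop (l :: rest) false)
            = PySem.Str.join " " (pvALoop rest false) := by
          have hT' := hT; have hF' := hF
          simp at hT' hF'
          simp [pvALoop, hT', hF']
        rw [hA, ih, ← hskip]
        have hF' := hF
        simp at hF'
        simp [hF']

-- ===== VERDICT (by name: the statement is the Claim_ definition above) =====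
theorem extract_tools_section_py_spec : Claim_equal_extract_tools_section_py := by
  intro response _
  unfold Spec_extract_tools_section_py extract_tools_section_py extract_tools_section_py_alt
  simp only []
  rw [pv_take_findIdx, pv_flag_false]
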